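-- pv_equiv track=rewrite | github.com/AnekantEmployee/soc_l1 | rag/response_utils/external_search.py | _get_priority_vendors
-- ===== SOURCE A (Python) =====
-- from typing import Dict, Any, List, Optional, Tuple
--
-- def _get_priority_vendors(alert_category: str) -> List[str]:
--     """Get prioritized vendor list based on alert category."""
--     category_vendor_mapping = {
--         "authentication": ["microsoft", "okta", "ping_identity"],
--         "endpoint": ["crowdstrike", "carbon_black", "sentinelone"],
--         "network": ["palo_alto", "fortinet", "cisco"],
--         "cloud": ["microsoft", "aws", "google_cloud"],
--     }
--
--     priority_vendors = category_vendor_mapping.get(alert_category, [])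
--     # Always include Microsoft for general coverage
--     if "microsoft" not in priority_vendors:
--         priority_vendors.insert(0, "microsoft")
--
--     # Add other major vendors
--     all_vendors = ["microsoft", "crowdstrike", "palo_alto", "fortinet"]
--     for vendor in all_vendors:
--         if vendor not in priority_vendors:
--             priority_vendors.append(vendor)
--
--     return priority_vendors[:3]  # Limit to top 3
-- ===== SOURCE B (Python) =====
-- # B: the whole computation collapses to a fixed 4-entry table with a fixed
-- # default; a single lookup replaces the insert/append/truncate pipeline.
-- _PRIORITY_TABLE = {
--     "authentication": ("microsoft", "okta", "ping_identity"),
--     "endpoint": ("microsoft", "crowdstrike", "carbon_black"),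
--     "network": ("microsoft", "palo_alto", "fortinet"),
--     "cloud": ("microsoft", "aws", "google_cloud"),
-- }
--
-- def _get_priority_vendors(alert_category: str):
--     return list(_PRIORITY_TABLE.get(alert_category, ("microsoft", "crowdstrike", "palo_alto")))
-- ===== Notes on version B (the rewrite author's own statement) =====
-- stated objective: simpler
-- what changed: Replaces the build-then-fix pipeline (dict lookup, conditional insert of microsoft, loop appending major vendors, truncation to 3) with a single lookup in a precomputed table of final three-vendor lists with a fixed default.
import Mathlib
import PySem

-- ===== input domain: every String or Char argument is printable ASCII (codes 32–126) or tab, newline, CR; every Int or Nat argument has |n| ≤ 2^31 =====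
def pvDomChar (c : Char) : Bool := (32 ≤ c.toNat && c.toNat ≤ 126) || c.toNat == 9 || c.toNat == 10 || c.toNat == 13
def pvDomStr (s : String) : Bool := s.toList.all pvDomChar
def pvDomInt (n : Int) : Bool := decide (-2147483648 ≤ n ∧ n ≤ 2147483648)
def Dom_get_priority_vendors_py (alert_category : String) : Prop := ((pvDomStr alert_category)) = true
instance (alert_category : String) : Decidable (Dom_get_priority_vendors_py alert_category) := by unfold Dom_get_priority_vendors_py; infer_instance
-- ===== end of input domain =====

-- B replaces A's build-then-fix pipeline with one lookup in a precomputed table of final results (objective: simpler).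

-- ===== PORT A =====
def get_priority_vendors_py (alert_category : String) : List String :=
  let category_vendor_mapping : PySem.Dict String (List String) := PySem.Dict.ofList
    [("authentication", ["microsoft", "okta", "ping_identity"]),
     ("endpoint", ["crowdstrike", "carbon_black", "sentinelone"]),
     ("network", ["palo_alto", "fortinet", "cisco"]),
     ("cloud", ["microsoft", "aws", "google_cloud"])]
  let priority_vendors := category_vendor_mapping.getD alert_category []
  -- if "microsoft" not in priority_vendors: priority_vendors.insert(0, "microsoft")
  let priority_vendors :=
    if "microsoft" ∈ priority_vendors then priority_vendors
    else PySem.List.insert priority_vendors 0 "microsoft"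
  -- for vendor in all_vendors: if vendor not in priority_vendors: priority_vendors.append(vendor)
  let all_vendors := ["microsoft", "crowdstrike", "palo_alto", "fortinet"]
  let priority_vendors := all_vendors.foldl
    (fun acc vendor => if vendor ∈ acc then acc else acc ++ [vendor]) priority_vendors
  -- return priority_vendors[:3]
  PySem.List.slice priority_vendors none (some 3)

-- ===== PORT B =====
def pvPriorityTable : PySem.Dict String (List String) := PySem.Dict.ofList
  [("authentication", ["microsoft", "okta", "ping_identity"]),
   ("endpoint", ["microsoft", "crowdstrike", "carbon_black"]),
   ("network", ["microsoft", "palo_alto", "fortinet"]),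
   ("cloud", ["microsoft", "aws", "google_cloud"])]

def get_priority_vendors_py_alt (alert_category : String) : List String :=
  pvPriorityTable.getD alert_category ["microsoft", "crowdstrike", "palo_alto"]

-- ===== PRECONDITION & SPEC =====
def Spec_get_priority_vendors_py (alert_category : String) (out : List String) : Prop := out = get_priority_vendors_py_alt alert_category
instance (alert_category : String) (out : List String) : Decidable (Spec_get_priority_vendors_py alert_category out) := by unfold Spec_get_priority_vendors_py; infer_instance

-- ===== CLAIM (what is proved, stated in full; the proofs are below) =====
def Claim_equal_get_priority_vendors_py : Prop := ∀ (alert_category : String), Dom_get_priority_vendors_py alert_category → Spec_get_priority_vendors_py alert_category (get_priority_vendors_py alert_category)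

-- ===== LEMMAS AND PROOFS =====

-- ===== VERDICT (by name: the statement is the Claim_ definition above) =====
theorem get_priority_vendors_py_spec : Claim_equal_get_priority_vendors_py := by
  intro s _
  unfold Spec_get_priority_vendors_py
  by_cases h1 : s = "authentication"; · subst h1; decide
  by_cases h2 : s = "endpoint"; · subst h2; decide
  by_cases h3 : s = "network"; · subst h3; decide
  by_cases h4 : s = "cloud"; · subst h4; decide
  simp [get_priority_vendors_py, get_priority_vendors_py_alt, pvPriorityTable,
        PySem.Dict.ofList, PySem.Dict.update, PySem.Dict.getD_insert, h1, h2, h3, h4]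
  decide
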